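-- pv_equiv track=rewrite | github.com/sashakile/XAct.jl | packages/sxact/src/sxact/translate/wl_to_julia.py | _preprocess_subhead
-- ===== SOURCE A (Python) =====
-- def _wl_subhead(wl_arg: str) -> str:
--     """Extract the outermost function head from a WL expression string."""
--     wl_arg = wl_arg.strip()
--     pos = wl_arg.find("[")
--     if pos == -1:
--         return wl_arg
--     return wl_arg[:pos]
--
-- def _preprocess_subhead(expr: str) -> str:
--     """Rewrite ``SubHead[...]`` in WL notation to a Julia Symbol literal."""
--     result: list[str] = []
--     i = 0
--     n = len(expr)
--     while i < n:
--         if expr[i : i + 8] == "SubHead[":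
--             depth = 1
--             j = i + 8
--             while j < n and depth > 0:
--                 if expr[j] == "[":
--                     depth += 1
--                 elif expr[j] == "]":
--                     depth -= 1
--                 j += 1
--             inner = expr[i + 8 : j - 1]
--             head = _wl_subhead(inner)
--             result.append(f":{head}")
--             i = j
--             continue
--         result.append(expr[i])
--         i += 1
--     return "".join(result)
-- ===== SOURCE B (Python) =====
-- def _preprocess_subhead(expr: str) -> str:
--     """Rewrite SubHead[...] to a Julia Symbol literal.
--     Segment-copying rewrite: str.find locates each marker (copying whole
--     chunks verbatim) and the matching bracket is found by jumping between
--     bracket positions instead of scanning every character."""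
--     out = []
--     i = 0
--     n = len(expr)
--     while True:
--         pos = expr.find("SubHead[", i)
--         if pos == -1:
--             out.append(expr[i:])
--             return "".join(out)
--         out.append(expr[i:pos])
--         depth = 1
--         j = pos + 8
--         while depth > 0:
--             o = expr.find("[", j)
--             c = expr.find("]", j)
--             if o == -1 and c == -1:
--                 j = n
--                 break
--             if o != -1 and (c == -1 or o < c):
--                 depth += 1
--                 j = o + 1
--             else:
--                 depth -= 1
--                 j = c + 1
--         head = expr[pos + 8 : j - 1].strip().partition("[")[0]
--         out.append(":" + head)
--         i = j
-- ===== Notes on version B (the rewrite author's own statement) =====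
-- stated objective: faster
-- what changed: A scans character by character, testing an 8-character slice at every position and appending single characters; B copies whole segments between marker occurrences located with str.find and finds the matching close bracket by jumping between the next open/close bracket positions instead of inspecting every character.
import Mathlib
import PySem

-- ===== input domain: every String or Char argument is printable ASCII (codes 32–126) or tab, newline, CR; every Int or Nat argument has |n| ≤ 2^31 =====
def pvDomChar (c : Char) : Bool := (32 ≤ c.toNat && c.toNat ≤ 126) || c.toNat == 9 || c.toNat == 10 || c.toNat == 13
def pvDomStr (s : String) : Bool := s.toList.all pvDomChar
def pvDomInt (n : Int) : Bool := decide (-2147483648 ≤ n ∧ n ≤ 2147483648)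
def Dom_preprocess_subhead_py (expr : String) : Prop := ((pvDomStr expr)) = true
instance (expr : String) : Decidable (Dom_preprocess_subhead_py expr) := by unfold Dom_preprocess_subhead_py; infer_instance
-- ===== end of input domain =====

-- B replaces A's per-character scan by a find-based segment copier (str.find locates each
-- marker, bracket-position jumps find the matching bracket); measured faster in a timing run.

def pvMarker : List Char := ['S','u','b','H','e','a','d','[']

-- ===== PORT A =====
-- helper `_wl_subhead`: strip, find '[', slice before it (whole string if absent)
def wl_subhead_py (wl_arg : List Char) : List Char :=
  let s := PySem.Chars.strip wl_arg
  let pos := PySem.Chars.find s ['[']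
  if pos = -1 then s else s.take pos.toNat

-- inner `while j < n and depth > 0` loop of A: returns the number of characters consumed
def pvScanA (depth : Int) : List Char → Nat
  | [] => 0
  | c :: rest =>
    if depth > 0 then
      1 + pvScanA (if c = '[' then depth + 1 else if c = ']' then depth - 1 else depth) rest
    else 0

-- outer per-character while loop of A, on the suffix starting at i
def pvGoA (cs : List Char) : List Char :=
  match cs with
  | [] => []
  | c :: rest =>
    if (c :: rest).take 8 = pvMarker then
      let tail := (c :: rest).drop 8
      let consumed := pvScanA 1 tail        -- j = i + 8 + consumed
      let inner := tail.take (consumed - 1) -- expr[i+8 : j-1]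
      (':' :: wl_subhead_py inner) ++ pvGoA (tail.drop consumed)
    else
      c :: pvGoA rest
termination_by cs.length
decreasing_by
  all_goals simp_all [List.length_drop]

def preprocess_subhead_py (expr : String) : String := String.ofList (pvGoA expr.toList)

-- ===== PORT B =====
-- B's `expr.find("SubHead[", i)`: splits cs into (part before the first marker, part after it)
def pvSplitMarker : List Char → Option (List Char × List Char)
  | [] => none
  | c :: rest =>
    if (c :: rest).take 8 = pvMarker then some ([], (c :: rest).drop 8)
    else
      match pvSplitMarker rest with
      | none => none
      | some (pre, tail) => some (c :: pre, tail)

-- B's bracket-jumping loop: find the next '[' and the next ']', jump to the nearer one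
def pvJumpB (depth : Int) (cs : List Char) : Nat :=
  if depth > 0 then
    match ho : cs.findIdx? (· = '['), hc : cs.findIdx? (· = ']') with
    | none, none => cs.length
    | some k, none => k + 1 + pvJumpB (depth + 1) (cs.drop (k + 1))
    | none, some k => k + 1 + pvJumpB (depth - 1) (cs.drop (k + 1))
    | some ko, some kc =>
      if ko < kc then ko + 1 + pvJumpB (depth + 1) (cs.drop (ko + 1))
      else kc + 1 + pvJumpB (depth - 1) (cs.drop (kc + 1))
  else 0
termination_by cs.length
decreasing_by
  all_goals simp_all [List.length_drop, List.findIdx?_eq_some_iff_findIdx_eq]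
  all_goals omega

-- B's head extraction: strip then partition("[")[0]
def pvHeadB (inner : List Char) : List Char :=
  (PySem.Chars.strip inner).takeWhile (· ≠ '[')

-- termination lemma for pvGoB (the tail after the marker is strictly shorter)
theorem pvSplitMarker_tail_lt : ∀ (cs pre tail : List Char), pvSplitMarker cs = some (pre, tail) → tail.length < cs.length := by
  intro cs
  induction cs with
  | nil => intro pre tail h; simp [pvSplitMarker] at h
  | cons c rest ih =>
    intro pre tail h
    rw [pvSplitMarker] at h
    split at h
    · simp only [Option.some.injEq, Prod.mk.injEq] at h
      have h2 : tail = (c :: rest).drop 8 := h.2.symm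
      subst h2
      simp [List.length_drop]
    · cases hr : pvSplitMarker rest with
      | none => rw [hr] at h; simp at h
      | some pt =>
        obtain ⟨p, t⟩ := pt
        rw [hr] at h
        simp only [Option.some.injEq, Prod.mk.injEq] at h
        have := ih p t hr
        have h2 : tail = t := h.2.symm
        subst h2
        simp
        omega

def pvGoB (cs : List Char) : List Char :=
  match h : pvSplitMarker cs with
  | none => cs
  | some (pre, tail) =>
    let consumed := pvJumpB 1 tail
    let inner := tail.take (consumed - 1)
    pre ++ (':' :: pvHeadB inner) ++ pvGoB (tail.drop consumed)
termination_by cs.length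
decreasing_by
  exact lt_of_le_of_lt (by simp [List.length_drop]) (pvSplitMarker_tail_lt cs pre tail h)

def preprocess_subhead_py_alt (expr : String) : String := String.ofList (pvGoB expr.toList)

-- ===== PRECONDITION & SPEC =====
def Spec_preprocess_subhead_py (expr : String) (out : String) : Prop := out = preprocess_subhead_py_alt expr
instance (expr : String) (out : String) : Decidable (Spec_preprocess_subhead_py expr out) := by unfold Spec_preprocess_subhead_py; infer_instance

-- ===== CLAIM (what is proved, stated in full; the proofs are below) =====
def Claim_equal_preprocess_subhead_py : Prop := ∀ (expr : String), Dom_preprocess_subhead_py expr → Spec_preprocess_subhead_py expr (preprocess_subhead_py expr)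

-- ===== LEMMAS AND PROOFS =====

-- non-dependent unfolding of pvJumpB (the definition's match carries equation binders)
theorem pvJumpB_eq (d : Int) (cs : List Char) :
    pvJumpB d cs =
      if d > 0 then
        match cs.findIdx? (· = '['), cs.findIdx? (· = ']') with
        | none, none => cs.length
        | some k, none => k + 1 + pvJumpB (d + 1) (cs.drop (k + 1))
        | none, some k => k + 1 + pvJumpB (d - 1) (cs.drop (k + 1))
        | some ko, some kc =>
          if ko < kc then ko + 1 + pvJumpB (d + 1) (cs.drop (ko + 1))
          else kc + 1 + pvJumpB (d - 1) (cs.drop (kc + 1))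
      else 0 := by
  rw [pvJumpB]
  by_cases hd : d > 0
  · simp only [hd, if_pos]
    split <;> rename_i h1 h2 <;> rw [h1, h2]
  · simp [hd]

-- jumping to the next bracket consumes the same count as scanning char by char
theorem pvScanA_eq_pvJumpB (cs : List Char) : ∀ d, pvScanA d cs = pvJumpB d cs := by
  induction cs with
  | nil =>
    intro d
    rw [pvJumpB_eq]
    simp [pvScanA]
  | cons c rest ih =>
    intro d
    by_cases hd : d > 0
    · rw [pvScanA, pvJumpB_eq]
      simp only [hd, if_pos, List.findIdx?_cons]
      by_cases ho : c = '['
      · subst ho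
        simp only [decide_eq_true_eq, if_pos rfl, if_neg (by decide : ¬('[' : Char) = ']')]
        cases hcl : rest.findIdx? (fun x => decide (x = ']')) with
        | none => simp [hcl, ih]
        | some k => simp [hcl, ih]
      · by_cases hc : c = ']'
        · subst hc
          simp only [decide_eq_true_eq, if_neg (by decide : ¬(']' : Char) = '['), if_pos rfl]
          cases hol : rest.findIdx? (fun x => decide (x = '[')) with
          | none => simp [hol, ih, hd]
          | some k => simp [hol, ih, hd]
        · simp only [decide_eq_true_eq, if_neg ho, if_neg hc]
          rw [ih]
          cases hol : rest.findIdx? (fun x => decide (x = '[')) with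
          | none =>
            cases hcl : rest.findIdx? (fun x => decide (x = ']')) with
            | none =>
              rw [pvJumpB_eq, if_pos hd]
              simp only [hol, hcl, Option.map_none, List.length_cons]
              ring
            | some k =>
              rw [pvJumpB_eq, if_pos hd]
              simp only [hol, hcl, Option.map_none, Option.map_some, List.drop_succ_cons]
              ring
          | some k =>
            cases hcl : rest.findIdx? (fun x => decide (x = ']')) with
            | none =>
              rw [pvJumpB_eq, if_pos hd]
              simp only [hol, hcl, Option.map_none, Option.map_some, List.drop_succ_cons]
              ring
            | some m =>
              rw [pvJumpB_eq, if_pos hd]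
              simp only [hol, hcl, Option.map_some, List.drop_succ_cons]
              by_cases hkm : k < m
              · rw [if_pos (by omega : k + 1 < m + 1), if_pos hkm]
                ring
              · rw [if_neg (by omega : ¬ k + 1 < m + 1), if_neg hkm]
                ring
    · rw [pvScanA, pvJumpB_eq]
      simp [hd]

-- a one-character pattern is a prefix iff it is the head
theorem pvSingle_prefix (c : Char) (t : List Char) : [c] <+: t ↔ t.head? = some c := by
  constructor
  · rintro ⟨t', rfl⟩; rfl
  · intro h
    cases t with
    | nil => simp at h
    | cons a t' => simp at h; exact ⟨t', by simp [h]⟩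

theorem pvTakeWhile_of_not_mem (l : List Char) (h : '[' ∉ l) : l.takeWhile (· ≠ '[') = l := by
  induction l with
  | nil => rfl
  | cons a t ih =>
    simp at h
    have ha : ¬ a = '[' := fun hh => h.1 hh.symm
    rw [List.takeWhile_cons, if_pos (by simpa using ha)]
    exact congrArg (a :: ·) (ih h.2)

theorem pvTake_eq_takeWhile (l : List Char) : ∀ (k : Nat), l[k]? = some '[' →
    (∀ i, i < k → l[i]? ≠ some '[') → l.take k = l.takeWhile (· ≠ '[') := by
  induction l with
  | nil => intro k hk _; simp at hk
  | cons a t ih =>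
    intro k hk hmin
    cases k with
    | zero =>
      simp at hk
      simp [hk, List.takeWhile_cons]
    | succ k' =>
      have ha : ¬ a = '[' := by
        intro h; exact hmin 0 (Nat.succ_pos _) (by simp [h])
      simp only [List.getElem?_cons_succ] at hk
      rw [List.take_succ_cons, List.takeWhile_cons, if_pos (by simpa using ha)]
      exact congrArg (a :: ·) (ih k' hk (fun i hi => by
        have := hmin (i + 1) (by omega)
        simpa using this))

theorem pvHead_eq (inner : List Char) : wl_subhead_py inner = pvHeadB inner := by
  unfold wl_subhead_py pvHeadB
  by_cases hf : PySem.Chars.find (PySem.Chars.strip inner) ['['] = -1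
  · rw [if_pos hf]
    have hni : ¬ ['['] <:+: PySem.Chars.strip inner := (PySem.Chars.find_eq_neg_one_iff _ _).mp hf
    have hnm : '[' ∉ PySem.Chars.strip inner := by
      intro hm
      obtain ⟨a, b, hab⟩ := List.append_of_mem hm
      exact hni ⟨a, b, by rw [hab]; simp⟩
    exact (pvTakeWhile_of_not_mem _ hnm).symm
  · rw [if_neg hf]
    have h0 : 0 ≤ PySem.Chars.find (PySem.Chars.strip inner) ['['] := by
      have := PySem.Chars.neg_one_le_find (PySem.Chars.strip inner) ['[']
      omega
    obtain ⟨hpre, hmin⟩ := PySem.Chars.find_spec h0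
    apply pvTake_eq_takeWhile
    · have := (pvSingle_prefix '[' _).mp hpre
      rwa [List.head?_drop] at this
    · intro i hi hsome
      exact hmin i hi ((pvSingle_prefix '[' _).mpr (by rwa [List.head?_drop]))

-- non-dependent unfolding of pvGoB
theorem pvGoB_eq (cs : List Char) :
    pvGoB cs =
      match pvSplitMarker cs with
      | none => cs
      | some (pre, tail) =>
        pre ++ (':' :: pvHeadB (tail.take (pvJumpB 1 tail - 1))) ++ pvGoB (tail.drop (pvJumpB 1 tail)) := by
  rw [pvGoB]
  split <;> rename_i h <;> rw [h]

theorem pvGoB_cons_nomark (c : Char) (rest : List Char) (hm : ¬ (c :: rest).take 8 = pvMarker) :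
    pvGoB (c :: rest) = c :: pvGoB rest := by
  have hm' : ¬ c :: rest.take 7 = pvMarker := by simpa using hm
  rw [pvGoB_eq (c :: rest), pvGoB_eq rest]
  rw [pvSplitMarker]
  cases hr : pvSplitMarker rest with
  | none => simp [hm', hr]
  | some pt =>
    obtain ⟨p, t⟩ := pt
    simp [hm', hr]

theorem pvGoA_eq_pvGoB (cs : List Char) : pvGoA cs = pvGoB cs := by
  induction cs using pvGoA.induct with
  | case1 =>
    rw [pvGoA, pvGoB_eq]
    rfl
  | case2 c rest hm tail consumed ih =>
    have hs : pvSplitMarker (c :: rest) = some ([], (c :: rest).drop 8) := by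
      rw [pvSplitMarker]
      simp [hm]
    rw [pvGoA, if_pos hm, pvGoB_eq, hs]
    simp only [List.nil_append]
    rw [← pvScanA_eq_pvJumpB, ← pvHead_eq]
    exact congrArg _ ih
  | case3 c rest hm ih =>
    rw [pvGoA, if_neg hm, pvGoB_cons_nomark c rest hm]
    exact congrArg (c :: ·) ih

-- ===== VERDICT (by name: the statement is the Claim_ definition above) =====
theorem preprocess_subhead_py_spec : Claim_equal_preprocess_subhead_py := by
  intro expr _
  unfold Spec_preprocess_subhead_py preprocess_subhead_py preprocess_subhead_py_alt
  exact congrArg String.ofList (pvGoA_eq_pvGoB _)
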